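-- pv_equiv track=rewrite | github.com/TrimVis/pare | eval_coverage_json.py | _clean_path
-- ===== SOURCE A (Python) =====
-- def _clean_path(path: str) -> str:
--     # Find the first occurrences of "src", "build", and "include"
--     src_index = path.find("src")
--     build_index = path.find("build")
--     include_index = path.find("include")
--
--     # List of all valid indices (non-negative ones)
--     indices = [i for i in [src_index, build_index, include_index] if i != -1]
--
--     # Determine the earliest occurrence of "src", "build", or "include"
--     if indices:
--         earliest_index = min(indices)
--         return path[earliest_index:]
--
--     # If none of "src", "build", or "include" are found, return the original path
--     return path
-- ===== SOURCE B (Python) =====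
-- def _clean_path(path: str) -> str:
--     # Single left-to-right sweep: return the suffix at the first position where
--     # one of the keywords starts; if none, return the path unchanged.
--     keywords = ("src", "build", "include")
--     for i in range(len(path)):
--         if path[i:].startswith(keywords):
--             return path[i:]
--     return path
-- ===== Notes on version B (the rewrite author's own statement) =====
-- stated objective: alternative
-- what changed: Replaces three independent find() scans plus a filtered min() by a single left-to-right sweep that returns the suffix at the first position where any of the three keywords starts.
import Mathlib
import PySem

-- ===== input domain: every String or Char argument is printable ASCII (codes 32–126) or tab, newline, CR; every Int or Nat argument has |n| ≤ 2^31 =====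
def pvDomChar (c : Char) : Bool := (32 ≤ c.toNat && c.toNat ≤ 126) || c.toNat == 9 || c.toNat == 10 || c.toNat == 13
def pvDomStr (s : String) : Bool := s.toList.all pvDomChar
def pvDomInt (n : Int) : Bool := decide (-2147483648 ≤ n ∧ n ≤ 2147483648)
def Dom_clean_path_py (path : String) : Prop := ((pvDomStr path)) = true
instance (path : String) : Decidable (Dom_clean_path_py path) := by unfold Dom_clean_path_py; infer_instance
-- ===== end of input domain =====

-- B replaces three find() scans + min() by one left-to-right prefix sweep (alternative decomposition, same cost).

-- ===== PORT A =====
def clean_path_py (path : String) : String :=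
  let src_index := PySem.Str.find path "src"
  let build_index := PySem.Str.find path "build"
  let include_index := PySem.Str.find path "include"
  let indices := [src_index, build_index, include_index].filter (fun i => i ≠ -1)
  match PySem.List.min? indices (fun x => x) with
  | some earliest => PySem.Str.slice path (some earliest) none
  | none => path

-- ===== PORT B =====
-- path[i:].startswith(("src", "build", "include"))
def pvAltHit (l : List Char) (i : Nat) : Bool :=
  PySem.Chars.startswith (l.drop i) "src".toList ||
  PySem.Chars.startswith (l.drop i) "build".toList ||
  PySem.Chars.startswith (l.drop i) "include".toList

-- the 'for i in range(len(path))' sweep; falls through to the original list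
def pvAltGo (l : List Char) (i : Nat) : List Char :=
  if _h : i < l.length then
    if pvAltHit l i then l.drop i else pvAltGo l (i + 1)
  else l
termination_by l.length - i

def clean_path_py_alt (path : String) : String :=
  String.ofList (pvAltGo path.toList 0)

-- ===== PRECONDITION & SPEC =====
def Spec_clean_path_py (path : String) (out : String) : Prop := out = clean_path_py_alt path
instance (path : String) (out : String) : Decidable (Spec_clean_path_py path out) := by unfold Spec_clean_path_py; infer_instance

-- ===== CLAIM (what is proved, stated in full; the proofs are below) =====
def Claim_equal_clean_path_py : Prop := ∀ (path : String), Dom_clean_path_py path → Spec_clean_path_py path (clean_path_py path)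

-- ===== LEMMAS AND PROOFS =====

theorem pvHit_of_prefix (l : List Char) (i : Nat)
    (h : "src".toList <+: l.drop i ∨ "build".toList <+: l.drop i ∨ "include".toList <+: l.drop i) :
    pvAltHit l i = true := by
  unfold pvAltHit
  simp only [Bool.or_eq_true, PySem.Chars.startswith_iff]
  tauto

theorem pvHit_elim {l : List Char} {i : Nat} (h : pvAltHit l i = true) :
    "src".toList <+: l.drop i ∨ "build".toList <+: l.drop i ∨ "include".toList <+: l.drop i := by
  unfold pvAltHit at h
  simp only [Bool.or_eq_true, PySem.Chars.startswith_iff] at h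
  tauto

theorem pvHit_lt_length {l : List Char} {i : Nat} (h : pvAltHit l i = true) : i < l.length := by
  rcases pvHit_elim h with h | h | h <;>
  · by_contra hge
    rw [List.drop_eq_nil_of_le (by omega)] at h
    simp [List.prefix_nil] at h

theorem pvAltGo_of_none (l : List Char) (i : Nat) (h : ∀ j, pvAltHit l j = false) :
    pvAltGo l i = l := by
  unfold pvAltGo
  split
  · rw [h i]
    simpa using pvAltGo_of_none l (i + 1) h
  · rfl
termination_by l.length - i

theorem pvAltGo_of_hit (l : List Char) (m : Nat) (hm : pvAltHit l m = true)
    (hmin : ∀ j < m, pvAltHit l j = false) (i : Nat) (hi : i ≤ m) :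
    pvAltGo l i = l.drop m := by
  have hlen := pvHit_lt_length hm
  unfold pvAltGo
  rcases Nat.lt_or_ge i m with hlt | hge
  · rw [dif_pos (by omega), hmin i hlt]
    simpa using pvAltGo_of_hit l m hm hmin (i + 1) hlt
  · have hEq : i = m := by omega
    subst hEq
    rw [dif_pos hlen, hm]
    simp
termination_by m - i

theorem pvFind_ne_neg_one_of_prefix {l kw : List Char} {m : Nat} (hpre : kw <+: l.drop m) :
    PySem.Chars.find l kw ≠ -1 := by
  rw [PySem.Chars.find_ne_neg_one_iff, ← PySem.Chars.isIn_iff_infix]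
  exact (PySem.Chars.exists_prefix_drop_iff_isIn kw l).1 ⟨m, hpre⟩

theorem pvFind_bound {l kw : List Char} {m : Nat}
    (hhit : ∀ j, kw <+: l.drop j → pvAltHit l j = true)
    (hmin : ∀ j < m, pvAltHit l j = false)
    (h : PySem.Chars.find l kw ≠ -1) :
    (m : Int) ≤ PySem.Chars.find l kw := by
  have h0 : 0 ≤ PySem.Chars.find l kw := by
    have := PySem.Chars.neg_one_le_find (s := l) (sub := kw)
    omega
  obtain ⟨hpre, _⟩ := PySem.Chars.find_spec h0
  by_contra hc
  push Not at hc
  have hlt : (PySem.Chars.find l kw).toNat < m := by omega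
  have heq := hhit _ hpre
  rw [hmin _ hlt] at heq
  exact absurd heq (by simp)

theorem pvFind_eq {l kw : List Char} {m : Nat}
    (hhit : ∀ j, kw <+: l.drop j → pvAltHit l j = true)
    (hmin : ∀ j < m, pvAltHit l j = false)
    (hpre : kw <+: l.drop m) :
    PySem.Chars.find l kw = (m : Int) := by
  have hne := pvFind_ne_neg_one_of_prefix hpre
  have hge := pvFind_bound hhit hmin hne
  have h0 : 0 ≤ PySem.Chars.find l kw := by
    have := PySem.Chars.neg_one_le_find (s := l) (sub := kw)
    omega
  obtain ⟨_, hminf⟩ := PySem.Chars.find_spec h0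
  have hle : (PySem.Chars.find l kw).toNat ≤ m := by
    by_contra hc
    push Not at hc
    exact hminf m hc hpre
  omega

-- ===== VERDICT (by name: the statement is the Claim_ definition above) =====
theorem clean_path_py_spec : Claim_equal_clean_path_py := by
  unfold Claim_equal_clean_path_py Spec_clean_path_py
  intro path _
  set l := path.toList with hl
  by_cases hex : ∃ i, pvAltHit l i = true
  · -- some keyword occurs
    set m := Nat.find hex with hmdef
    have hm : pvAltHit l m = true := Nat.find_spec hex
    have hmin : ∀ j < m, pvAltHit l j = false := by
      intro j hj
      have := Nat.find_min hex hj
      simpa using this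
    -- B side
    have hB : clean_path_py_alt path = String.ofList (l.drop m) := by
      unfold clean_path_py_alt
      rw [← hl, pvAltGo_of_hit l m hm hmin 0 (Nat.zero_le m)]
    -- A side helpers
    have hhit_src : ∀ j, "src".toList <+: l.drop j → pvAltHit l j = true :=
      fun j h => pvHit_of_prefix l j (Or.inl h)
    have hhit_build : ∀ j, "build".toList <+: l.drop j → pvAltHit l j = true :=
      fun j h => pvHit_of_prefix l j (Or.inr (Or.inl h))
    have hhit_include : ∀ j, "include".toList <+: l.drop j → pvAltHit l j = true :=
      fun j h => pvHit_of_prefix l j (Or.inr (Or.inr h))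
    set f1 := PySem.Chars.find l "src".toList with hf1
    set f2 := PySem.Chars.find l "build".toList with hf2
    set f3 := PySem.Chars.find l "include".toList with hf3
    set indices := [f1, f2, f3].filter (fun i => i ≠ -1) with hidx
    have hub : ∀ x ∈ indices, (m : Int) ≤ x := by
      intro x hx
      rw [hidx] at hx
      simp only [List.mem_filter, List.mem_cons, List.not_mem_nil, or_false,
        decide_eq_true_eq] at hx
      obtain ⟨hor, hne⟩ := hx
      rcases hor with rfl | rfl | rfl
      · exact pvFind_bound hhit_src hmin hne
      · exact pvFind_bound hhit_build hmin hne
      · exact pvFind_bound hhit_include hmin hne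
    have hmem : (m : Int) ∈ indices := by
      rw [hidx]
      simp only [List.mem_filter, List.mem_cons, List.not_mem_nil, or_false,
        decide_eq_true_eq]
      refine ⟨?_, by omega⟩
      rcases pvHit_elim hm with h | h | h
      · exact Or.inl (pvFind_eq hhit_src hmin h).symm
      · exact Or.inr (Or.inl (pvFind_eq hhit_build hmin h).symm)
      · exact Or.inr (Or.inr (pvFind_eq hhit_include hmin h).symm)
    -- A computes 'min indices', which is m
    unfold clean_path_py
    simp only [PySem.Str.find_eq, ← hl, ← hf1, ← hf2, ← hf3, ← hidx]
    cases hmq : PySem.List.min? indices (fun x => x) with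
    | none =>
      rw [PySem.List.min?_eq_none_iff] at hmq
      rw [hmq] at hmem
      exact absurd hmem (List.not_mem_nil)
    | some x =>
      have hx1 := PySem.List.min?_mem hmq
      have hx2 := PySem.List.min?_isMin hmq (m : Int) hmem
      have hx3 := hub x hx1
      have hxm : x = (m : Int) := le_antisymm hx2 hx3
      subst hxm
      rw [hB]
      show PySem.Str.slice path (some (m : Int)) none = String.ofList (l.drop m)
      simp [PySem.Str.slice, PySem.List.slice_from _ (by omega : (0:Int) ≤ (m:Int)), hl]
  · -- no keyword occurs anywhere
    have hall : ∀ j, pvAltHit l j = false := by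
      intro j
      by_contra hc
      exact hex ⟨j, by simpa using hc⟩
    have hB : clean_path_py_alt path = path := by
      unfold clean_path_py_alt
      rw [← hl, pvAltGo_of_none l 0 hall, hl, String.ofList_toList]
    have hfind : ∀ kw : List Char,
        (∀ j, kw <+: l.drop j → pvAltHit l j = true) → PySem.Chars.find l kw = -1 := by
      intro kw hhit
      rw [PySem.Chars.find_eq_neg_one_iff]
      intro hinf
      have hisin : PySem.Chars.isIn kw l = true := (PySem.Chars.isIn_iff_infix kw l).2 hinf
      obtain ⟨j, hj⟩ := (PySem.Chars.exists_prefix_drop_iff_isIn kw l).2 hisin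
      have := hhit j hj
      rw [hall j] at this
      exact absurd this (by simp)
    have h1 := hfind "src".toList (fun j h => pvHit_of_prefix l j (Or.inl h))
    have h2 := hfind "build".toList (fun j h => pvHit_of_prefix l j (Or.inr (Or.inl h)))
    have h3 := hfind "include".toList (fun j h => pvHit_of_prefix l j (Or.inr (Or.inr h)))
    unfold clean_path_py
    simp only [PySem.Str.find_eq, ← hl, h1, h2, h3]
    norm_num
    exact hB.symm
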